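-- pv_equiv track=rewrite | github.com/MichielMortier/AdventOfCode2020 | Python/oef11.py | fill_empty
-- ===== SOURCE A (Python) =====
-- import itertools
--
-- def fill_empty(seats):
--     copy = [x.copy() for x in seats]
--     for i in range(len(seats)):
--         for j in range(len(seats[i])):
--             if seats[i][j] == 'L':
--                 count = 0
--                 for k, w in itertools.product(range(i - 1, i + 2), range(j - 1, j + 2)):
--                     if k == i and w == j:
--                         continue
--                     if -1 < k < len(seats) and -1 < w < len(seats[i]):
--                         count += 1 if seats[k][w] == '#' else 0
--                 if count == 0:
--                     copy[i][j] = '#'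
--     return copy
-- ===== SOURCE B (Python) =====
-- def fill_empty(seats):
--     copy = [row.copy() for row in seats]
--     blocked = set()
--     for i, row in enumerate(seats):
--         for j, c in enumerate(row):
--             if c == '#':
--                 for k in range(i - 1, i + 2):
--                     for w in range(j - 1, j + 2):
--                         blocked.add((k, w))
--     for i, row in enumerate(seats):
--         for j, c in enumerate(row):
--             if c == 'L' and (i, j) not in blocked:
--                 copy[i][j] = '#'
--     return copy
-- ===== Notes on version B (the rewrite author's own statement) =====
-- stated objective: alternative
-- what changed: Instead of counting the 3x3 occupied neighbors for each 'L' seat (gather), B makes one scatter pass building a set of all coordinates adjacent to any '#' seat and then fills exactly the 'L' seats not in that set.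
-- outside the precondition, e.g. on fill_empty([['L'], ['.', '#']]): A returns [['#'], ['.', '#']], B returns [['L'], ['.', '#']]
import Mathlib
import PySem

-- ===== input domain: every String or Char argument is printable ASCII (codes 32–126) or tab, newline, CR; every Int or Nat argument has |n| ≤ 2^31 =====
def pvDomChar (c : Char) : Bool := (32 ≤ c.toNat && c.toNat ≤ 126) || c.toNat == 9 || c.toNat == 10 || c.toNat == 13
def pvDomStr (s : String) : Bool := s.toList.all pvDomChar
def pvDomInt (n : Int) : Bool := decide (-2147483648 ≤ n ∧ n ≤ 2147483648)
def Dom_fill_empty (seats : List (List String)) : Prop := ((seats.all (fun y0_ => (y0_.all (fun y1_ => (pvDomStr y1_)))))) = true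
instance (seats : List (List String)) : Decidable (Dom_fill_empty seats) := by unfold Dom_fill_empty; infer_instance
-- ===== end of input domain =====

-- B replaces the per-'L'-seat 3×3 neighbor count by one scatter pass that marks every cell
-- adjacent to a '#' as blocked, then fills the unblocked 'L' seats (alternative decomposition).


-- ===== PORT A =====
-- seats[k][w]; the "" / [] defaults are only reachable outside Pre_fill_empty (where Python raises IndexError)
def pvCell (seats : List (List String)) (k w : Int) : String :=
  PySem.List.pyGetD (PySem.List.pyGetD seats k []) w ""

-- copy[i][j] = v; exact for 0 ≤ i, j, which holds at every call site (indices come from range(0, …))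
def pvSet2 (g : List (List String)) (i j : Int) (v : String) : List (List String) :=
  g.set i.toNat ((g.getD i.toNat []).set j.toNat v)

-- A's inner counting loop over itertools.product(range(i-1, i+2), range(j-1, j+2))
def pvCountA (seats : List (List String)) (i j : Int) : Int :=
  ((PySem.List.pyRange (i - 1) (i + 2)).flatMap (fun k =>
      (PySem.List.pyRange (j - 1) (j + 2)).map (fun w => (k, w)))).foldl
    (fun count kw =>
      if kw.1 = i ∧ kw.2 = j then count
      else if -1 < kw.1 ∧ kw.1 < PySem.List.len seats ∧ -1 < kw.2 ∧ kw.2 < PySem.List.len (PySem.List.pyGetD seats i []) then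
        count + (if pvCell seats kw.1 kw.2 = "#" then 1 else 0)
      else count) 0

def fill_empty (seats : List (List String)) : List (List String) :=
  let copy := List.map (fun x => x) seats
  (PySem.List.pyRange 0 (PySem.List.len seats)).foldl (fun copy i =>
    (PySem.List.pyRange 0 (PySem.List.len (PySem.List.pyGetD seats i []))).foldl (fun copy j =>
      if pvCell seats i j = "L" then
        if pvCountA seats i j = 0 then pvSet2 copy i j "#" else copy
      else copy) copy) copy

-- ===== PORT B =====
-- B's first pass: the set of coordinates within Chebyshev distance 1 of some '#' seat
def pvBlocked (seats : List (List String)) : PySem.Set (Int × Int) :=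
  (PySem.List.enumerate seats).foldl (fun b ir =>
    (PySem.List.enumerate ir.2).foldl (fun b jc =>
      if jc.2 = "#" then
        (PySem.List.pyRange (ir.1 - 1) (ir.1 + 2)).foldl (fun b k =>
          (PySem.List.pyRange (jc.1 - 1) (jc.1 + 2)).foldl (fun b w =>
            PySem.Set.add b (k, w)) b) b
      else b) b) PySem.Set.empty

def fill_empty_alt (seats : List (List String)) : List (List String) :=
  let copy := List.map (fun row => row) seats
  let blocked := pvBlocked seats
  (PySem.List.enumerate seats).foldl (fun copy ir =>
    (PySem.List.enumerate ir.2).foldl (fun copy jc =>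
      if jc.2 = "L" ∧ (ir.1, jc.1) ∉ blocked then pvSet2 copy ir.1 jc.1 "#"
      else copy) copy) copy

-- ===== PRECONDITION & SPEC =====
-- Pre_ excludes ragged grids that contain an 'L' seat: there A raises IndexError whenever an 'L' seat's
-- neighbor window reaches past a shorter neighboring row, and where it happens to return, its window is
-- clipped to the current row's length — an artefact of its index arithmetic; B treats each row by its own
-- length.  (On grids with no 'L' cell both programs return an unchanged copy, whatever the shape.)
def Pre_fill_empty (seats : List (List String)) : Prop :=
  (∀ r ∈ seats, r.length = (seats.headD []).length) ∨ (∀ r ∈ seats, ∀ c ∈ r, c ≠ "L")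
instance (seats : List (List String)) : Decidable (Pre_fill_empty seats) := by
  unfold Pre_fill_empty; infer_instance

def pvWitness_fill_empty : List (List String) := [["L", "#"], [".", "L"]]

def Spec_fill_empty (seats : List (List String)) (out : List (List String)) : Prop := out = fill_empty_alt seats
instance (seats : List (List String)) (out : List (List String)) : Decidable (Spec_fill_empty seats out) := by unfold Spec_fill_empty; infer_instance

-- ===== CLAIM (what is proved, stated in full; the proofs are below) =====
def Claim_equal_fill_empty : Prop := ∀ (seats : List (List String)), Dom_fill_empty seats → Pre_fill_empty seats → Spec_fill_empty seats (fill_empty seats)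

-- ===== LEMMAS AND PROOFS =====

-- membership in a set-accumulating fold, one layer at a time
lemma pv_mem_foldl_iff {α β : Type} (y : α) (Q : β → Prop) (f : List α → β → List α)
    (h : ∀ s b, y ∈ f s b ↔ y ∈ s ∨ Q b) :
    ∀ (l : List β) (s : List α), y ∈ l.foldl f s ↔ y ∈ s ∨ ∃ b ∈ l, Q b := by
  intro l
  induction l with
  | nil => simp
  | cons b t ih =>
      intro s
      rw [List.foldl_cons, ih, h]
      simp only [List.mem_cons]
      constructor
      · rintro ((hy | hq) | ⟨c, hc, hq⟩)
        · exact Or.inl hy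
        · exact Or.inr ⟨b, Or.inl rfl, hq⟩
        · exact Or.inr ⟨c, Or.inr hc, hq⟩
      · rintro (hy | ⟨c, (rfl | hc), hq⟩)
        · exact Or.inl (Or.inl hy)
        · exact Or.inl (Or.inr hq)
        · exact Or.inr ⟨c, hc, hq⟩

-- rows of a rectangular grid all have the head row's length
lemma pv_rect_len {seats : List (List String)} (hpre : ∀ r ∈ seats, r.length = (seats.headD []).length)
    {a : Int} (h0 : 0 ≤ a) (h1 : a < (seats.length : Int)) :
    (PySem.List.pyGetD seats a []).length = (seats.headD []).length := by
  rw [PySem.List.pyGetD_eq_getElem seats [] h0 h1]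
  exact hpre _ (List.getElem_mem _)

-- characterisation of B's blocked set
lemma pv_mem_pvBlocked (seats : List (List String)) (p : Int × Int) :
    p ∈ pvBlocked seats ↔
      ∃ a b : Int, 0 ≤ a ∧ a < (seats.length : Int) ∧ 0 ≤ b ∧
        b < ((PySem.List.pyGetD seats a []).length : Int) ∧
        pvCell seats a b = "#" ∧
        a - 1 ≤ p.1 ∧ p.1 ≤ a + 1 ∧ b - 1 ≤ p.2 ∧ p.2 ≤ b + 1 := by
  have hK : ∀ (x z : Int) (s : PySem.Set (Int × Int)),
      p ∈ (PySem.List.pyRange (x - 1) (x + 2)).foldl (fun b k =>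
          (PySem.List.pyRange (z - 1) (z + 2)).foldl (fun b w =>
            PySem.Set.add b (k, w)) b) s ↔
        p ∈ s ∨ ∃ k ∈ PySem.List.pyRange (x - 1) (x + 2),
          ∃ w ∈ PySem.List.pyRange (z - 1) (z + 2), p = (k, w) := by
    intro x z s
    exact pv_mem_foldl_iff p _ _
      (fun s k => PySem.Set.mem_foldl_add _ (fun w => (k, w)) s p) _ s
  have hG : ∀ (x : Int) (jc : Int × String) (s : PySem.Set (Int × Int)),
      p ∈ (if jc.2 = "#" then
          (PySem.List.pyRange (x - 1) (x + 2)).foldl (fun b k =>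
            (PySem.List.pyRange (jc.1 - 1) (jc.1 + 2)).foldl (fun b w =>
              PySem.Set.add b (k, w)) b) s
        else s) ↔
        p ∈ s ∨ (jc.2 = "#" ∧ ∃ k ∈ PySem.List.pyRange (x - 1) (x + 2),
          ∃ w ∈ PySem.List.pyRange (jc.1 - 1) (jc.1 + 2), p = (k, w)) := by
    intro x jc s
    split_ifs with h
    · rw [hK]; tauto
    · tauto
  have hF : ∀ (ir : Int × List String) (s : PySem.Set (Int × Int)),
      p ∈ (PySem.List.enumerate ir.2).foldl (fun b jc =>
          if jc.2 = "#" then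
            (PySem.List.pyRange (ir.1 - 1) (ir.1 + 2)).foldl (fun b k =>
              (PySem.List.pyRange (jc.1 - 1) (jc.1 + 2)).foldl (fun b w =>
                PySem.Set.add b (k, w)) b) b
          else b) s ↔
        p ∈ s ∨ ∃ jc ∈ PySem.List.enumerate ir.2,
          (jc.2 = "#" ∧ ∃ k ∈ PySem.List.pyRange (ir.1 - 1) (ir.1 + 2),
            ∃ w ∈ PySem.List.pyRange (jc.1 - 1) (jc.1 + 2), p = (k, w)) := by
    intro ir s
    exact pv_mem_foldl_iff p _ _ (fun s jc => hG ir.1 jc s) _ s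
  unfold pvBlocked
  rw [pv_mem_foldl_iff p
        (fun ir => ∃ jc ∈ PySem.List.enumerate ir.2,
          (jc.2 = "#" ∧ ∃ k ∈ PySem.List.pyRange (ir.1 - 1) (ir.1 + 2),
            ∃ w ∈ PySem.List.pyRange (jc.1 - 1) (jc.1 + 2), p = (k, w))) _
        (fun s ir => hF ir s)]
  rw [PySem.List.enumerate_eq_map_pyRange seats []]
  simp only [PySem.Set.empty, List.not_mem_nil, false_or, List.mem_map,
    PySem.List.mem_pyRange_one, PySem.List.len]
  constructor
  · rintro ⟨ir, ⟨⟨a, ⟨ha0, ha1⟩, rfl⟩, jc, hjc, hhash, k, hk, w, hw, rfl⟩⟩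
    rw [PySem.List.enumerate_eq_map_pyRange _ ""] at hjc
    simp only [List.mem_map, PySem.List.mem_pyRange_one, PySem.List.len] at hjc
    obtain ⟨b, ⟨hb0, hb1⟩, rfl⟩ := hjc
    exact ⟨a, b, ha0, ha1, hb0, hb1, hhash, by omega, by omega, by omega, by omega⟩
  · rintro ⟨a, b, ha0, ha1, hb0, hb1, hhash, h1, h2, h3, h4⟩
    refine ⟨(a, PySem.List.pyGetD seats a []), ⟨a, ⟨ha0, ha1⟩, rfl⟩,
      (b, PySem.List.pyGetD (PySem.List.pyGetD seats a []) b ""), ?_, hhash, p.1, ?_, p.2, ?_, rfl⟩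
    · rw [PySem.List.enumerate_eq_map_pyRange _ ""]
      simp only [List.mem_map, PySem.List.mem_pyRange_one, PySem.List.len]
      exact ⟨b, ⟨hb0, hb1⟩, rfl⟩
    · omega
    · omega

-- A's count as a countP
lemma pv_countA_eq (seats : List (List String)) (i j : Int) :
    pvCountA seats i j =
      (((PySem.List.pyRange (i - 1) (i + 2)).flatMap (fun k =>
          (PySem.List.pyRange (j - 1) (j + 2)).map (fun w => (k, w)))).countP
        (fun kw => decide (¬(kw.1 = i ∧ kw.2 = j) ∧
          (-1 < kw.1 ∧ kw.1 < PySem.List.len seats ∧ -1 < kw.2 ∧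
            kw.2 < PySem.List.len (PySem.List.pyGetD seats i [])) ∧
          pvCell seats kw.1 kw.2 = "#")) : Int) := by
  unfold pvCountA
  rw [PySem.List.foldl_congr_mem _ _
      (fun c kw => c + (if (decide (¬(kw.1 = i ∧ kw.2 = j) ∧
          (-1 < kw.1 ∧ kw.1 < PySem.List.len seats ∧ -1 < kw.2 ∧
            kw.2 < PySem.List.len (PySem.List.pyGetD seats i [])) ∧
          pvCell seats kw.1 kw.2 = "#")) = true then (1:Int) else 0)) 0 ?_]
  · rw [PySem.List.foldl_add, PySem.List.sum_map_ite_one_zero, zero_add]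
  · intro acc kw _
    by_cases h1 : kw.1 = i ∧ kw.2 = j <;>
      by_cases h2 : (-1 < kw.1 ∧ kw.1 < PySem.List.len seats ∧ -1 < kw.2 ∧ kw.2 < PySem.List.len (PySem.List.pyGetD seats i [])) <;>
        by_cases h3 : pvCell seats kw.1 kw.2 = "#" <;> simp [h1, h2, h3] <;> split_ifs <;> omega

-- the heart: per-cell agreement of the two predicates (rectangular grid)
lemma pv_cond_iff {seats : List (List String)} (hpre : ∀ r ∈ seats, r.length = (seats.headD []).length)
    {i j : Int} (hi0 : 0 ≤ i) (hi1 : i < (seats.length : Int))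
    (hj0 : 0 ≤ j) (hj1 : j < ((PySem.List.pyGetD seats i []).length : Int))
    (hL : pvCell seats i j = "L") :
    pvCountA seats i j = 0 ↔ (i, j) ∉ pvBlocked seats := by
  rw [pv_countA_eq, Int.natCast_eq_zero, List.countP_eq_zero, pv_mem_pvBlocked]
  simp only [List.mem_flatMap, List.mem_map, PySem.List.mem_pyRange_one,
    decide_eq_true_eq, PySem.List.len]
  constructor
  · intro h hex
    obtain ⟨a, b, ha0, ha1, hb0, hb1, hhash, h1, h2, h3, h4⟩ := hex
    have hrect : ((PySem.List.pyGetD seats a []).length : Int)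
        = ((PySem.List.pyGetD seats i []).length : Int) := by
      exact_mod_cast congrArg (Nat.cast : Nat → Int)
        ((pv_rect_len hpre ha0 ha1).trans (pv_rect_len hpre hi0 hi1).symm)
    refine h (a, b) ⟨a, ⟨by omega, by omega⟩, b, ⟨by omega, by omega⟩, rfl⟩
      ⟨?_, ⟨by omega, by omega, by omega, by omega⟩, hhash⟩
    rintro ⟨rfl, rfl⟩
    rw [hL] at hhash
    simp at hhash
  · intro hnot kw hkw hit
    obtain ⟨k, ⟨hk1, hk2⟩, w, ⟨hw1, hw2⟩, rfl⟩ := hkw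
    obtain ⟨hne, ⟨hb1, hb2, hb3, hb4⟩, hhash⟩ := hit
    have hrect : ((PySem.List.pyGetD seats k []).length : Int)
        = ((PySem.List.pyGetD seats i []).length : Int) := by
      exact_mod_cast congrArg (Nat.cast : Nat → Int)
        ((pv_rect_len hpre (by omega) hb2).trans (pv_rect_len hpre hi0 hi1).symm)
    exact hnot ⟨k, w, by omega, hb2, by omega, by omega, hhash,
      by omega, by omega, by omega, by omega⟩

-- a cell reached by index (a, j) in range is a member of the grid
lemma pv_cell_mem {seats : List (List String)} {a j : Int}
    (ha0 : 0 ≤ a) (ha1 : a < (seats.length : Int))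
    (hj0 : 0 ≤ j) (hj1 : j < ((PySem.List.pyGetD seats a []).length : Int)) :
    PySem.List.pyGetD seats a [] ∈ seats ∧
      pvCell seats a j ∈ PySem.List.pyGetD seats a [] := by
  constructor
  · rw [PySem.List.pyGetD_eq_getElem seats [] ha0 ha1]
    exact List.getElem_mem _
  · unfold pvCell
    rw [PySem.List.pyGetD_eq_getElem _ "" hj0 hj1]
    exact List.getElem_mem _

-- the rectangular case
lemma pv_spec_rect {seats : List (List String)}
    (hrect : ∀ r ∈ seats, r.length = (seats.headD []).length) :
    fill_empty seats = fill_empty_alt seats := by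
  unfold fill_empty fill_empty_alt
  simp only [List.map_id']
  rw [PySem.List.enumerate_eq_map_pyRange seats [], List.foldl_map]
  apply PySem.List.foldl_congr_mem
  intro acc a ha
  simp only [PySem.List.mem_pyRange_one] at ha
  rw [PySem.List.enumerate_eq_map_pyRange _ "", List.foldl_map]
  simp only [PySem.List.len]
  apply PySem.List.foldl_congr_mem
  intro c jx hj
  simp only [PySem.List.mem_pyRange_one] at hj
  by_cases hL : pvCell seats a jx = "L"
  · have hcond := pv_cond_iff hrect ha.1 ha.2 hj.1 hj.2 hL
    have hcell : PySem.List.pyGetD (PySem.List.pyGetD seats a []) jx "" = "L" := hL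
    simp only [hL, hcell, if_true, true_and, hcond]
  · have hcell : ¬ PySem.List.pyGetD (PySem.List.pyGetD seats a []) jx "" = "L" := hL
    simp [hL, hcell]

-- the no-'L' case: A leaves the copy untouched …
lemma pv_noL_A {seats : List (List String)}
    (hnoL : ∀ r ∈ seats, ∀ c ∈ r, c ≠ "L") : fill_empty seats = seats := by
  unfold fill_empty
  simp only [List.map_id']
  rw [PySem.List.foldl_congr_mem _ _ (fun (c : List (List String)) (_ : Int) => c) seats ?_,
    PySem.List.foldl_ignore]
  intro acc a ha
  simp only [PySem.List.mem_pyRange_one, PySem.List.len] at ha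
  rw [PySem.List.foldl_congr_mem _ _ (fun (c : List (List String)) (_ : Int) => c) acc ?_,
    PySem.List.foldl_ignore]
  intro c jx hj
  simp only [PySem.List.mem_pyRange_one, PySem.List.len] at hj
  have hmem := pv_cell_mem ha.1 ha.2 hj.1 hj.2
  exact if_neg (hnoL _ hmem.1 _ hmem.2)

-- … and so does B
lemma pv_noL_B {seats : List (List String)}
    (hnoL : ∀ r ∈ seats, ∀ c ∈ r, c ≠ "L") : fill_empty_alt seats = seats := by
  unfold fill_empty_alt
  simp only [List.map_id']
  rw [PySem.List.enumerate_eq_map_pyRange seats [], List.foldl_map]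
  rw [PySem.List.foldl_congr_mem _ _ (fun (c : List (List String)) (_ : Int) => c) seats ?_,
    PySem.List.foldl_ignore]
  intro acc a ha
  simp only [PySem.List.mem_pyRange_one, PySem.List.len] at ha
  rw [PySem.List.enumerate_eq_map_pyRange _ "", List.foldl_map]
  rw [PySem.List.foldl_congr_mem _ _ (fun (c : List (List String)) (_ : Int) => c) acc ?_,
    PySem.List.foldl_ignore]
  intro c jx hj
  simp only [PySem.List.mem_pyRange_one, PySem.List.len] at hj
  have hmem := pv_cell_mem ha.1 ha.2 hj.1 hj.2
  refine if_neg ?_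
  rintro ⟨h1, -⟩
  exact hnoL _ hmem.1 _ hmem.2 h1

theorem fill_empty_spec : Claim_equal_fill_empty := by
  rintro seats _ (hrect | hnoL)
  · exact pv_spec_rect hrect
  · unfold Spec_fill_empty
    rw [pv_noL_A hnoL, pv_noL_B hnoL]
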